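-- pv_equiv track=rewrite | github.com/domokane/FinancePy | pep8_converter/run_pep8_converter.py | ensure_blank_line_after_defs_and_classes
-- ===== SOURCE A (Python) =====
-- def ensure_blank_line_after_defs_and_classes(source: str) -> str:
--     """Ensure a blank line after each def or class line."""
--     lines = source.splitlines()
--     new_lines = []
--     n = len(lines)
--     i = 0
--     while i < n:
--         line = lines[i]
--         new_lines.append(line)
--         stripped = line.lstrip()
--         if stripped.startswith(("def ", "class ")):
--             if i + 1 < n and lines[i + 1].strip() != "":
--                 new_lines.append("")
--         i += 1
--     return "\n".join(new_lines) + "\n"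
-- ===== SOURCE B (Python) =====
-- def ensure_blank_line_after_defs_and_classes(source: str) -> str:
--     """Ensure a blank line after each def or class line.
--
--     Traverses the lines in REVERSE, tracking whether the line that follows
--     (in original order) is non-blank; builds the output back-to-front and
--     reverses it at the end."""
--     out = []
--     next_nonblank = False
--     for line in reversed(source.splitlines()):
--         if line.lstrip().startswith(("def ", "class ")) and next_nonblank:
--             out.append("")
--         out.append(line)
--         next_nonblank = line.strip() != ""
--     return "\n".join(reversed(out)) + "\n"
-- ===== Notes on version B (the rewrite author's own statement) =====
-- stated objective: alternative
-- what changed: Replaced A's forward index loop with i+1 lookahead by a reverse traversal that builds the output back-to-front, carrying a flag telling whether the following line is non-blank, and reverses once at the end.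
import Mathlib
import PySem

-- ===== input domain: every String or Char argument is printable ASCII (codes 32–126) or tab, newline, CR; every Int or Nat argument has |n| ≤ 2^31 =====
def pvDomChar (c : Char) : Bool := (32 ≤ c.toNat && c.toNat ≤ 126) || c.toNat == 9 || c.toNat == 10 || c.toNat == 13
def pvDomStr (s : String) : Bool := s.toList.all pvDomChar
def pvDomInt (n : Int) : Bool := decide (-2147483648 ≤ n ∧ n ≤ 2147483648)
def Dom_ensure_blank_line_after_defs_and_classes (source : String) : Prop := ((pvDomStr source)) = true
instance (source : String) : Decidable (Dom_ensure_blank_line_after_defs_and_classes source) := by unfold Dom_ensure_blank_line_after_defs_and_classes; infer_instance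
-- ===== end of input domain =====

-- B traverses the lines in reverse, building the output back-to-front with a flag telling whether the following line is non-blank; objective: alternative.

-- ===== PORT A =====
-- A's while i < n loop, index-based with lookahead at lines[i+1]
def pvAGo (lines : List String) (i : Nat) (acc : List String) : List String :=
  if _h : i < lines.length then
    let line := lines[i]
    let acc1 := acc ++ [line]
    let stripped := PySem.Str.lstrip line
    let acc2 :=
      if (PySem.Str.startswith stripped "def " || PySem.Str.startswith stripped "class ") = true then
        if i + 1 < lines.length ∧ PySem.Str.strip (lines.getD (i + 1) "") ≠ "" then
          acc1 ++ [""]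
        else acc1
      else acc1
    pvAGo lines (i + 1) acc2
  else acc
termination_by lines.length - i

def ensure_blank_line_after_defs_and_classes (source : String) : String :=
  let lines := PySem.Str.splitlines source
  PySem.Str.join "\n" (pvAGo lines 0 []) ++ "\n"

-- ===== PORT B =====
-- B's for-loop over reversed(lines): flag = "the following (original-order) line is non-blank"
def pvBGo (rlines : List String) (nextNonblank : Bool) (out : List String) : List String :=
  match rlines with
  | [] => out
  | line :: rest =>
    let out1 :=
      if ((PySem.Str.startswith (PySem.Str.lstrip line) "def "
            || PySem.Str.startswith (PySem.Str.lstrip line) "class ") && nextNonblank) = true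
      then out ++ [""] else out
    pvBGo rest (PySem.Str.strip line != "") (out1 ++ [line])

def ensure_blank_line_after_defs_and_classes_alt (source : String) : String :=
  PySem.Str.join "\n" (pvBGo (PySem.Str.splitlines source).reverse false []).reverse ++ "\n"

-- ===== PRECONDITION & SPEC =====
def Spec_ensure_blank_line_after_defs_and_classes (source : String) (out : String) : Prop := out = ensure_blank_line_after_defs_and_classes_alt source
instance (source : String) (out : String) : Decidable (Spec_ensure_blank_line_after_defs_and_classes source out) := by unfold Spec_ensure_blank_line_after_defs_and_classes; infer_instance

-- ===== CLAIM (what is proved, stated in full; the proofs are below) =====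
def Claim_equal_ensure_blank_line_after_defs_and_classes : Prop := ∀ (source : String), Dom_ensure_blank_line_after_defs_and_classes source → Spec_ensure_blank_line_after_defs_and_classes source (ensure_blank_line_after_defs_and_classes source)

-- ===== LEMMAS AND PROOFS =====

def pvIsDef (l : String) : Bool :=
  PySem.Str.startswith (PySem.Str.lstrip l) "def " || PySem.Str.startswith (PySem.Str.lstrip l) "class "

-- functional form of A's loop output
def pvA' : List String → List String
  | [] => []
  | [l] => [l]
  | l :: l' :: rest =>
    l :: ((if pvIsDef l = true ∧ PySem.Str.strip l' ≠ "" then [""] else []) ++ pvA' (l' :: rest))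

-- functional form of B's reverse loop (pre-reversal), from empty accumulator
def pvG : List String → Bool → List String
  | [], _ => []
  | l :: rest, flag =>
    (if (pvIsDef l && flag) = true then [""] else []) ++ [l] ++ pvG rest (PySem.Str.strip l != "")

-- forward reading of B's result: flag tells whether a non-blank line follows the whole list
def pvH : List String → Bool → List String
  | [], _ => []
  | [l], flag => l :: (if (pvIsDef l && flag) = true then [""] else [])
  | l :: l' :: rest, flag =>
    l :: ((if (pvIsDef l && (PySem.Str.strip l' != "")) = true then [""] else []) ++ pvH (l' :: rest) flag)

theorem pvBGo_eq (rlines : List String) (flag : Bool) (acc : List String) :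
    pvBGo rlines flag acc = acc ++ pvG rlines flag := by
  induction rlines generalizing flag acc with
  | nil => simp [pvBGo, pvG]
  | cons l rest ih =>
    simp only [pvBGo, pvG, pvIsDef]
    rw [ih]
    split_ifs <;> simp

theorem pvH_append (xs : List String) (l : String) (flag : Bool) :
    pvH (xs ++ [l]) flag =
      pvH xs (PySem.Str.strip l != "") ++ [l] ++ (if (pvIsDef l && flag) = true then [""] else []) := by
  induction xs with
  | nil => simp [pvH]
  | cons x xs' ih =>
    cases xs' with
    | nil => simp [pvH]
    | cons y ys =>
      simp only [List.cons_append, pvH] at *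
      rw [ih]
      simp

theorem pvG_reverse (rls : List String) (flag : Bool) :
    (pvG rls flag).reverse = pvH rls.reverse flag := by
  induction rls generalizing flag with
  | nil => simp [pvG, pvH]
  | cons l rest ih =>
    simp only [pvG, List.reverse_append, List.reverse_cons, List.reverse_nil]
    rw [ih, pvH_append]
    split_ifs <;> simp

theorem pvH_false_eq_pvA' (ls : List String) : pvH ls false = pvA' ls := by
  induction ls with
  | nil => rfl
  | cons l rest ih =>
    cases rest with
    | nil => simp [pvH, pvA']
    | cons l' rest' =>
      simp only [pvH, pvA'] at *
      rw [ih]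
      split_ifs with h1 h2 h2 <;> simp_all [bne]

theorem pvAGo_eq (lines : List String) (i : Nat) (acc : List String) :
    pvAGo lines i acc = acc ++ pvA' (lines.drop i) := by
  by_cases h : i < lines.length
  · rw [pvAGo]
    simp only [h, dif_pos]
    rw [pvAGo_eq lines (i + 1) _]
    have hdrop : lines.drop i = lines[i] :: lines.drop (i + 1) :=
      List.drop_eq_getElem_cons h
    by_cases h2 : i + 1 < lines.length
    · have hdrop2 : lines.drop (i + 1) = lines[i + 1] :: lines.drop (i + 2) :=
        List.drop_eq_getElem_cons h2
      have hgd : lines.getD (i + 1) "" = lines[i + 1] := List.getD_eq_getElem _ _ h2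
      rw [hdrop, hdrop2]
      simp only [pvA', pvIsDef, hgd, h2, true_and]
      by_cases h3 : (PySem.Str.startswith (PySem.Str.lstrip lines[i]) "def "
          || PySem.Str.startswith (PySem.Str.lstrip lines[i]) "class ") = true
      · by_cases h4 : PySem.Str.strip lines[i + 1] ≠ ""
        · rw [if_pos h3, if_pos h4, if_pos ⟨h3, h4⟩]; simp
        · rw [if_pos h3, if_neg h4, if_neg (by tauto)]; simp
      · rw [if_neg h3, if_neg (by tauto)]; simp
    · have hnil : lines.drop (i + 1) = [] := by
        apply List.drop_eq_nil_of_le; omega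
      rw [hdrop, hnil]
      simp only [pvA']
      split_ifs with h3 h4 <;> simp_all
  · rw [pvAGo]
    simp only [h, dif_neg, not_false_iff]
    have : lines.drop i = [] := by apply List.drop_eq_nil_of_le; omega
    simp [this, pvA']
termination_by lines.length - i

-- ===== VERDICT (by name: the statement is the Claim_ definition above) =====
theorem ensure_blank_line_after_defs_and_classes_spec : Claim_equal_ensure_blank_line_after_defs_and_classes := by
  intro source _
  unfold Spec_ensure_blank_line_after_defs_and_classes
  show PySem.Str.join "\n" (pvAGo (PySem.Str.splitlines source) 0 []) ++ "\n" =
    PySem.Str.join "\n" (pvBGo (PySem.Str.splitlines source).reverse false []).reverse ++ "\n"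
  rw [pvAGo_eq, pvBGo_eq, List.nil_append, List.nil_append, pvG_reverse,
    List.reverse_reverse, pvH_false_eq_pvA', List.drop_zero]
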